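-- pv_equiv track=rewrite | github.com/PieInTheSky-Inc/YaDc | src/utility.py | should_escape_entity_name
-- ===== SOURCE A (Python) =====
-- def should_escape_entity_name(entity_name: str) -> bool:
--     if entity_name:
--         if entity_name != entity_name.strip():
--             return True
--         for markdown in ['_', '*', '~~', '>', '`']:
--             if markdown in entity_name:
--                 return True
--     return False
-- ===== SOURCE B (Python) =====
-- def should_escape_entity_name(entity_name: str) -> bool:
--     if not entity_name:
--         return False
--     if entity_name[0].isspace() or entity_name[-1].isspace():
--         return True
--     prev = ''
--     for ch in entity_name:
--         if ch in '_*>`' or (prev == '~' and ch == '~'):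
--             return True
--         prev = ch
--     return False
-- ===== Notes on version B (the rewrite author's own statement) =====
-- stated objective: alternative
-- what changed: Replaces A's five separate substring scans (one membership test per markdown token) by a single left-to-right pass over the characters that remembers the previous character to detect the double-tilde token, with the whitespace check done on the first and last character instead of building a stripped copy.
import Mathlib
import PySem

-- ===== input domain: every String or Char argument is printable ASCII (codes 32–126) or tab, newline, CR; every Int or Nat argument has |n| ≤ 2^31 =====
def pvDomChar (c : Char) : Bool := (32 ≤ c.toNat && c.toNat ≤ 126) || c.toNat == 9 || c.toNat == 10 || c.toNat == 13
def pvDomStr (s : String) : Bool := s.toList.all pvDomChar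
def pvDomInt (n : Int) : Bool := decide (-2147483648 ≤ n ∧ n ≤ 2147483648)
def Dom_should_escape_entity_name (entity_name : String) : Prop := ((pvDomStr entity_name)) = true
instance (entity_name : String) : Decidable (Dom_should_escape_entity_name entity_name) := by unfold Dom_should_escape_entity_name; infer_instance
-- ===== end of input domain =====

-- B replaces A's five separate substring scans by one single left-to-right pass that
-- remembers the previous character (to spot '~~'); objective: alternative single-pass algorithm.

-- ===== PORT A =====
-- A: truthiness guard, strip comparison, then a loop over the five markdown tokens
-- with an early return when one is a substring ('in'); ported loop = List.any.
def should_escape_entity_name (entity_name : String) : Bool :=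
  if entity_name ≠ "" then
    if entity_name ≠ PySem.Str.strip entity_name then true
    else ["_", "*", "~~", ">", "`"].any (fun markdown => PySem.Str.isIn markdown entity_name)
  else false

-- ===== PORT B =====
-- B's scan: prev = '' is `none`; early return = recursion stopping with true.
def pvAltScan : Option Char → List Char → Bool
  | _, [] => false
  | prev, c :: rest =>
    if c = '_' ∨ c = '*' ∨ c = '>' ∨ c = '`' ∨ (prev = some '~' ∧ c = '~') then true
    else pvAltScan (some c) rest

def pvAltCore : List Char → Bool
  | [] => false
  | c :: cs =>
    if PySem.Chars.isspace c || PySem.Chars.isspace ((c :: cs).getLast (by simp)) then true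
    else pvAltScan none (c :: cs)

def should_escape_entity_name_alt (entity_name : String) : Bool :=
  pvAltCore entity_name.toList

-- ===== PRECONDITION & SPEC =====
def Spec_should_escape_entity_name (entity_name : String) (out : Bool) : Prop := out = should_escape_entity_name_alt entity_name
instance (entity_name : String) (out : Bool) : Decidable (Spec_should_escape_entity_name entity_name out) := by unfold Spec_should_escape_entity_name; infer_instance

-- ===== CLAIM (what is proved, stated in full; the proofs are below) =====
def Claim_equal_should_escape_entity_name : Prop := ∀ (entity_name : String), Dom_should_escape_entity_name entity_name → Spec_should_escape_entity_name entity_name (should_escape_entity_name entity_name)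

-- ===== LEMMAS AND PROOFS =====

theorem pv_singleton_infix {a : Char} {l : List Char} : [a] <:+: l ↔ a ∈ l := by
  constructor
  · rintro ⟨s, t, h⟩; subst h; simp
  · intro h; obtain ⟨s, t, h⟩ := List.append_of_mem h; subst h; exact ⟨s, t, by simp⟩

theorem pv_singleton_prefix {a : Char} {l : List Char} : [a] <+: l ↔ l.head? = some a := by
  cases l with
  | nil => simp
  | cons c cs => simp [List.cons_prefix_cons, eq_comm]

theorem pv_pair_infix_cons {a b c : Char} {l : List Char} :
    [a, b] <:+: c :: l ↔ (c = a ∧ l.head? = some b) ∨ [a, b] <:+: l := by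
  rw [List.infix_cons_iff]
  constructor
  · rintro (h | h)
    · rw [show ([a, b] : List Char) = a :: [b] from rfl, List.cons_prefix_cons] at h
      exact Or.inl ⟨h.1.symm, pv_singleton_prefix.mp h.2⟩
    · exact Or.inr h
  · rintro (⟨rfl, h⟩ | h)
    · refine Or.inl ?_
      rw [show ([c, b] : List Char) = c :: [b] from rfl, List.cons_prefix_cons]
      exact ⟨rfl, pv_singleton_prefix.mpr h⟩
    · exact Or.inr h

-- characterization of B's scan
theorem pvAltScan_spec (l : List Char) (prev : Option Char) :
    pvAltScan prev l = true ↔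
      (∃ c ∈ l, c = '_' ∨ c = '*' ∨ c = '>' ∨ c = '`') ∨
      (prev = some '~' ∧ l.head? = some '~') ∨ [ '~', '~' ] <:+: l := by
  induction l generalizing prev with
  | nil => simp [pvAltScan]
  | cons c cs ih =>
    rw [pvAltScan]
    by_cases h : c = '_' ∨ c = '*' ∨ c = '>' ∨ c = '`' ∨ (prev = some '~' ∧ c = '~')
    · simp only [if_pos h]
      constructor
      · intro _
        rcases h with h | h | h | h | h
        · exact Or.inl ⟨c, by simp, Or.inl h⟩
        · exact Or.inl ⟨c, by simp, Or.inr (Or.inl h)⟩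
        · exact Or.inl ⟨c, by simp, Or.inr (Or.inr (Or.inl h))⟩
        · exact Or.inl ⟨c, by simp, Or.inr (Or.inr (Or.inr h))⟩
        · exact Or.inr (Or.inl ⟨h.1, by simp [h.2]⟩)
      · intro _; trivial
    · simp only [if_neg h, ih]
      push_neg at h
      obtain ⟨h1, h2, h3, h4, h5⟩ := h
      constructor
      · rintro (⟨d, hd, hdor⟩ | ⟨hp, hh⟩ | hinf)
        · exact Or.inl ⟨d, by simp [hd], hdor⟩
        · have hc : c = '~' := by simpa using hp
          exact Or.inr (Or.inr (pv_pair_infix_cons.mpr (Or.inl ⟨hc, hh⟩)))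
        · exact Or.inr (Or.inr (List.infix_cons_iff.mpr (Or.inr hinf)))
      · rintro (⟨d, hd, hdor⟩ | ⟨hp, hh⟩ | hinf)
        · rcases List.mem_cons.mp hd with rfl | hd'
          · rcases hdor with h' | h' | h' | h' <;> simp_all
          · exact Or.inl ⟨d, hd', hdor⟩
        · simp only [List.head?_cons, Option.some.injEq] at hh
          exact absurd hh (h5 hp)
        · rcases pv_pair_infix_cons.mp hinf with ⟨rfl, hh⟩ | hinf'
          · exact Or.inr (Or.inl ⟨rfl, hh⟩)
          · exact Or.inr (Or.inr hinf')

theorem pv_dropWhile_eq_self_of_head (p : Char → Bool) (c : Char) (cs : List Char)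
    (h : p c = false) : List.dropWhile p (c :: cs) = c :: cs := by
  simp [List.dropWhile_cons, h]

theorem pv_strip_fix (c : Char) (cs : List Char) :
    PySem.Chars.strip (c :: cs) = c :: cs ↔
      PySem.Chars.isspace c = false ∧
      PySem.Chars.isspace ((c :: cs).getLast (by simp)) = false := by
  have hL : ∀ (l : List Char) (hl : l ≠ []),
      (List.dropWhile PySem.Chars.isspace l = l ↔ PySem.Chars.isspace (l.head hl) = false) := by
    intro l hl
    cases l with
    | nil => exact absurd rfl hl
    | cons a as =>
      constructor
      · intro h
        by_contra hfalse
        have hp : PySem.Chars.isspace a = true := by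
          cases hps : PySem.Chars.isspace a with
          | false => exact absurd hps hfalse
          | true => rfl
        rw [List.dropWhile_cons, hp] at h
        simp only [if_pos rfl] at h
        have := List.Sublist.length_le (List.dropWhile_sublist (l := as) (p := PySem.Chars.isspace))
        have hlen := congrArg List.length h
        simp at hlen
        omega
      · intro h
        exact pv_dropWhile_eq_self_of_head _ _ _ h
  constructor
  · intro h
    unfold PySem.Chars.strip PySem.Chars.rstrip PySem.Chars.lstrip at h
    -- lengths force both dropWhiles to be identities
    have hsub1 : List.dropWhile PySem.Chars.isspace (c :: cs) <:+ c :: cs :=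
      List.dropWhile_suffix _
    have hlen1 : (List.dropWhile PySem.Chars.isspace (c :: cs)).length ≤ (c :: cs).length :=
      hsub1.length_le
    have hsub2 : List.dropWhile PySem.Chars.isspace (List.dropWhile PySem.Chars.isspace (c :: cs)).reverse
        <:+ (List.dropWhile PySem.Chars.isspace (c :: cs)).reverse := List.dropWhile_suffix _
    have hlen2 := hsub2.length_le
    have hlenh := congrArg List.length h
    simp only [List.length_reverse] at hlenh hlen2
    have hlen1' : (List.dropWhile PySem.Chars.isspace (c :: cs)).length = (c :: cs).length := by omega
    have hfix1 : List.dropWhile PySem.Chars.isspace (c :: cs) = c :: cs :=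
      List.IsSuffix.eq_of_length hsub1 hlen1'
    rw [hfix1] at h
    have h2 : List.dropWhile PySem.Chars.isspace (c :: cs).reverse = (c :: cs).reverse := by
      have := congrArg List.reverse h
      simpa using this
    have hc : PySem.Chars.isspace c = false := (hL (c :: cs) (by simp)).mp hfix1
    have hlast : PySem.Chars.isspace (((c :: cs).reverse).head (by simp)) = false :=
      (hL ((c :: cs).reverse) (by simp)).mp h2
    rw [List.head_reverse] at hlast
    exact ⟨hc, hlast⟩
  · rintro ⟨hc, hlast⟩
    unfold PySem.Chars.strip PySem.Chars.rstrip PySem.Chars.lstrip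
    rw [pv_dropWhile_eq_self_of_head _ _ _ hc]
    have h2 : List.dropWhile PySem.Chars.isspace (c :: cs).reverse = (c :: cs).reverse := by
      apply (hL ((c :: cs).reverse) (by simp)).mpr
      rw [List.head_reverse]; exact hlast
    rw [h2]; simp

-- the five-token any of A, characterized
theorem pv_anyIn_spec (s : String) :
    (["_", "*", "~~", ">", "`"].any (fun m => PySem.Str.isIn m s)) = true ↔
      (∃ c ∈ s.toList, c = '_' ∨ c = '*' ∨ c = '>' ∨ c = '`') ∨ [ '~', '~' ] <:+: s.toList := by
  simp only [List.any_cons, List.any_nil, Bool.or_eq_true, Bool.false_eq_true, or_false, PySem.Str.isIn_iff_infix]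
  have h1 : ("_".toList : List Char) = ['_'] := rfl
  have h2 : ("*".toList : List Char) = ['*'] := rfl
  have h3 : ("~~".toList : List Char) = ['~', '~'] := rfl
  have h4 : (">".toList : List Char) = ['>'] := rfl
  have h5 : ("`".toList : List Char) = ['`'] := rfl
  rw [h1, h2, h3, h4, h5]
  simp only [pv_singleton_infix, Bool.or_eq_false_iff]
  constructor
  · rintro (h | h | h | h | h)
    · exact Or.inl ⟨'_', h, Or.inl rfl⟩
    · exact Or.inl ⟨'*', h, Or.inr (Or.inl rfl)⟩
    · exact Or.inr h
    · exact Or.inl ⟨'>', h, Or.inr (Or.inr (Or.inl rfl))⟩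
    · exact Or.inl ⟨'`', h, Or.inr (Or.inr (Or.inr rfl))⟩
  · rintro (⟨c, hc, (rfl | rfl | rfl | rfl)⟩ | h) <;> tauto

theorem pv_ne_empty_iff (s : String) : s ≠ "" ↔ s.toList ≠ [] := by
  constructor
  · intro h hc; exact h (by
      have : s.toList = ("" : String).toList := by simpa using hc
      exact String.toList_inj.mp (by simpa using hc))
  · intro h hc; exact h (by rw [hc]; rfl)

theorem pv_strip_ne_iff (s : String) : s ≠ PySem.Str.strip s ↔ s.toList ≠ PySem.Chars.strip s.toList := by
  rw [← PySem.Str.toList_strip]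
  constructor
  · intro h hc; exact h (String.toList_inj.mp hc)
  · intro h hc; exact h (by conv_lhs => rw [hc])

-- ===== VERDICT (by name: the statement is the Claim_ definition above) =====
theorem should_escape_entity_name_spec : Claim_equal_should_escape_entity_name := by
  intro s _
  unfold Spec_should_escape_entity_name
  show should_escape_entity_name s = pvAltCore s.toList
  cases hL : s.toList with
  | nil =>
    have hs : s = "" := String.toList_inj.mp (by simpa using hL)
    subst hs; rfl
  | cons c cs =>
    have hne : s ≠ "" := (pv_ne_empty_iff s).mpr (by rw [hL]; simp)
    rw [should_escape_entity_name, if_pos hne, pvAltCore]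
    by_cases hstrip : s ≠ PySem.Str.strip s
    · rw [if_pos hstrip]
      -- strip differs ⇒ head or last is whitespace ⇒ B's first test fires
      have hdiff : s.toList ≠ PySem.Chars.strip s.toList := (pv_strip_ne_iff s).mp hstrip
      rw [hL] at hdiff
      have hnot : ¬ (PySem.Chars.isspace c = false ∧
          PySem.Chars.isspace ((c :: cs).getLast (by simp)) = false) := by
        intro hc; exact hdiff ((pv_strip_fix c cs).mpr hc).symm
      have hor : PySem.Chars.isspace c = true ∨
          PySem.Chars.isspace ((c :: cs).getLast (by simp)) = true := by
        by_contra hcon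
        push_neg at hcon
        exact hnot ⟨Bool.eq_false_iff.mpr hcon.1, Bool.eq_false_iff.mpr hcon.2⟩
      rw [if_pos (by rcases hor with h | h <;> simp [h])]
    · rw [if_neg hstrip]
      push_neg at hstrip
      have hfix : PySem.Chars.strip (c :: cs) = c :: cs := by
        have h0 : s.toList = (PySem.Str.strip s).toList := congrArg String.toList hstrip
        rw [PySem.Str.toList_strip, hL] at h0
        exact h0.symm
      obtain ⟨hc, hlast⟩ := (pv_strip_fix c cs).mp hfix
      rw [if_neg (by simp [hc, hlast])]
      -- both sides are now the pure markdown scans; compare via the characterizations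
      have hA := pv_anyIn_spec s
      rw [hL] at hA
      have hB := pvAltScan_spec (c :: cs) none
      simp only [show (none : Option Char) = some '~' ↔ False by simp, false_and, false_or] at hB
      cases hval : ["_", "*", "~~", ">", "`"].any (fun m => PySem.Str.isIn m s) with
      | true => exact (hB.mpr (hA.mp hval)).symm
      | false =>
        cases hval2 : pvAltScan none (c :: cs) with
        | false => rfl
        | true =>
          have hcontra := hA.mpr (hB.mp hval2)
          rw [hval] at hcontra
          exact absurd hcontra (by simp)
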